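-- pv_equiv track=rewrite | github.com/charlesnpx/keyframe | keyframe/pipeline/qa_targets.py | _last_hit
-- ===== SOURCE A (Python) =====
-- from typing import Any, Mapping
--
-- def _last_hit(
--     stage_membership: Mapping[str, Mapping[str, Any]],
--     stages: list[str],
-- ) -> tuple[str | None, Mapping[str, Any] | None]:
--     for stage in reversed(stages):
--         hit = stage_membership.get(stage)
--         if hit and hit.get("hit"):
--             return stage, hit
--     return None, None
-- ===== SOURCE B (Python) =====
-- from typing import Any, Mapping
--
-- def _last_hit(
--     stage_membership: Mapping[str, Mapping[str, Any]],
--     stages: list[str],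
-- ) -> tuple[str | None, Mapping[str, Any] | None]:
--     matches = [
--         (s, h)
--         for s in stages
--         if (h := stage_membership.get(s)) and h.get("hit")
--     ]
--     if matches:
--         return matches[-1]
--     return None, None
-- ===== Notes on version B (the rewrite author's own statement) =====
-- stated objective: alternative
-- what changed: A's reverse scan with early exit is replaced by a staged pipeline: build the forward list of all truthy-hit stages via a comprehension, then return its last element (or (None, None) if empty).
import Mathlib
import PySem

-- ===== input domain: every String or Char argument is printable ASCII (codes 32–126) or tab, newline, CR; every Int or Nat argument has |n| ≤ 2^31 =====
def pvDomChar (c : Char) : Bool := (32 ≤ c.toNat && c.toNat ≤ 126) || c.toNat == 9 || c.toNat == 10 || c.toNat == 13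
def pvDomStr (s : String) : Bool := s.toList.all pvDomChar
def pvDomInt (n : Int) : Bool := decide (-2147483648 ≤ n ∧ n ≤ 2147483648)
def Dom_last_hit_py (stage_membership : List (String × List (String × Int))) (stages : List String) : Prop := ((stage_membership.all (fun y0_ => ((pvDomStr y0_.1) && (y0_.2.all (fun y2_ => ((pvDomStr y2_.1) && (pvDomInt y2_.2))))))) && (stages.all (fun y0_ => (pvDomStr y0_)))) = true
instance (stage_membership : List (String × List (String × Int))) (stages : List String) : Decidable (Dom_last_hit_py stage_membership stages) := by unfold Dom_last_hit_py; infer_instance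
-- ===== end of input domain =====

-- B replaces A's reverse early-exit scan by a staged pipeline: filter the stages forward into the list of truthy hits, then take the last element (alternative decomposition, same cost).


-- ===== PORT A =====
-- truthiness of `hit and hit.get("hit")`: non-empty dict whose first "hit" entry is a nonzero int
def hitTruthy (hit : List (String × Int)) : Bool :=
  !hit.isEmpty &&
    (match List.lookup "hit" hit with
     | some v => v != 0
     | none => false)

-- the `for stage in reversed(stages)` loop with its early return
def lastHitRevLoop (sm : List (String × List (String × Int))) :
    List String → Option String × Option (List (String × Int))
  | [] => (none, none)
  | s :: rest =>
    match List.lookup s sm with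
    | some hit => if hitTruthy hit then (some s, some hit) else lastHitRevLoop sm rest
    | none => lastHitRevLoop sm rest

def last_hit_py (stage_membership : List (String × List (String × Int))) (stages : List String) :
    Option String × (Option (List (String × Int))) :=
  lastHitRevLoop stage_membership stages.reverse

-- ===== PORT B =====
-- B's comprehension guard: `(h := sm.get(s)) and h.get("hit")` written as a length/getD test
def keepHit (h : List (String × Int)) : Bool :=
  h.length != 0 && ((List.lookup "hit" h).getD 0 != 0)

-- the comprehension: each stage contributes (s, h) when its entry passes the guard
def hitMatch (sm : List (String × List (String × Int))) (s : String) :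
    Option (String × List (String × Int)) :=
  (List.lookup s sm).bind (fun h => if keepHit h then some (s, h) else none)

def last_hit_py_alt (stage_membership : List (String × List (String × Int))) (stages : List String) :
    Option String × (Option (List (String × Int))) :=
  match (stages.filterMap (hitMatch stage_membership)).getLast? with
  | some (s, h) => (some s, some h)
  | none => (none, none)

-- ===== PRECONDITION & SPEC =====
def Spec_last_hit_py (stage_membership : List (String × List (String × Int))) (stages : List String) (out : Option String × (Option (List (String × Int)))) : Prop := out = last_hit_py_alt stage_membership stages
instance (stage_membership : List (String × List (String × Int))) (stages : List String) (out : Option String × (Option (List (String × Int)))) : Decidable (Spec_last_hit_py stage_membership stages out) := by unfold Spec_last_hit_py; infer_instance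

-- ===== CLAIM (what is proved, stated in full; the proofs are below) =====
def Claim_equal_last_hit_py : Prop := ∀ (stage_membership : List (String × List (String × Int))) (stages : List String), Dom_last_hit_py stage_membership stages → Spec_last_hit_py stage_membership stages (last_hit_py stage_membership stages)

-- ===== LEMMAS AND PROOFS =====

-- the two truthiness tests agree
theorem keepHit_eq (h : List (String × Int)) : keepHit h = hitTruthy h := by
  cases h with
  | nil => simp [keepHit, hitTruthy]
  | cons p t =>
    simp only [keepHit, hitTruthy]
    cases List.lookup "hit" (p :: t) <;> simp

-- hitMatch written with A's truthiness test
def hitMatchA (sm : List (String × List (String × Int))) (s : String) :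
    Option (String × List (String × Int)) :=
  (List.lookup s sm).bind (fun h => if hitTruthy h then some (s, h) else none)

theorem hitMatch_eq_hitMatchA (sm : List (String × List (String × Int))) :
    hitMatch sm = hitMatchA sm := by
  funext s
  simp [hitMatch, hitMatchA, keepHit_eq]

-- A's reverse early-exit loop returns the head of the filtered list
theorem revLoop_eq_head (sm : List (String × List (String × Int))) (l : List String) :
    lastHitRevLoop sm l =
      (match (l.filterMap (hitMatchA sm)).head? with
       | some (s, h) => (some s, some h)
       | none => (none, none)) := by
  induction l with
  | nil => simp [lastHitRevLoop]
  | cons s rest ih =>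
    simp only [lastHitRevLoop, List.filterMap_cons, hitMatchA]
    cases hl : List.lookup s sm with
    | none => simpa [hitMatchA] using ih
    | some hit =>
      simp only [Option.bind_some]
      by_cases ht : hitTruthy hit
      · simp [ht]
      · simpa [ht, hitMatchA] using ih

-- ===== VERDICT (by name: the statement is the Claim_ definition above) =====
theorem last_hit_py_spec : Claim_equal_last_hit_py := by
  intro sm stages _
  unfold Spec_last_hit_py last_hit_py last_hit_py_alt
  rw [hitMatch_eq_hitMatchA, revLoop_eq_head, List.filterMap_reverse, List.head?_reverse]
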